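-- pv_equiv track=rewrite | github.com/reality324/protein-classifier | scripts/prepare_ligase_multitask_trainset.py | remap_multilabel_cell
-- ===== SOURCE A (Python) =====
-- from typing import Dict, List
--
-- def parse_labels(v: str, sep=";") -> List[str]:
--     if v is None:
--         return []
--     t = str(v).strip()
--     if not t or t.lower() in {"nan", "null"}:
--         return []
--     return [x.strip() for x in t.split(sep) if x.strip()]
--
-- def remap_multilabel_cell(v: str, keep: List[str], sep=";", rare_to_other=True, other_label="OTHER", fill_none=False):
--     tokens = parse_labels(v, sep=sep)
--     if not tokens:
--         return "NONE" if fill_none else ""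
--
--     out = []
--     rare_seen = False
--     for t in tokens:
--         if t in keep:
--             out.append(t)
--         else:
--             rare_seen = True
--     if rare_to_other and rare_seen:
--         out.append(other_label)
--     out = sorted(set(out))
--     if not out and fill_none:
--         return "NONE"
--     return sep.join(out)
-- ===== SOURCE B (Python) =====
-- from typing import List
--
-- def parse_labels(v: str, sep=";") -> List[str]:
--     if v is None:
--         return []
--     t = str(v).strip()
--     if not t or t.lower() in {"nan", "null"}:
--         return []
--     return [x.strip() for x in t.split(sep) if x.strip()]
--
-- def remap_multilabel_cell(v: str, keep: List[str], sep=";", rare_to_other=True, other_label="OTHER", fill_none=False):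
--     tokens = parse_labels(v, sep=sep)
--     if not tokens:
--         return "NONE" if fill_none else ""
--     token_set = set(tokens)
--     # iterate over the sorted, deduplicated keep list instead of over the tokens:
--     # the output is born sorted and duplicate-free, no final sort(set(...)) pass.
--     result = [k for k in sorted(set(keep)) if k in token_set]
--     # a rare token exists iff not every distinct token was kept (cardinality test)
--     if rare_to_other and len(result) < len(token_set) and other_label not in result:
--         i = 0
--         while i < len(result) and result[i] < other_label:
--             i += 1
--         result.insert(i, other_label)
--     if not result and fill_none:
--         return "NONE"
--     return sep.join(result)
-- ===== Notes on version B (the rewrite author's own statement) =====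
-- stated objective: alternative
-- what changed: B inverts the traversal: instead of looping over tokens with a rare_seen flag and a final sorted(set(...)) pass, it filters the sorted deduplicated keep list against set(tokens) so the output is born sorted and duplicate-free, detects a rare token by a cardinality comparison (len(result) < len(set(tokens))), and merges other_label by a single sorted insertion.
import Mathlib
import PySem

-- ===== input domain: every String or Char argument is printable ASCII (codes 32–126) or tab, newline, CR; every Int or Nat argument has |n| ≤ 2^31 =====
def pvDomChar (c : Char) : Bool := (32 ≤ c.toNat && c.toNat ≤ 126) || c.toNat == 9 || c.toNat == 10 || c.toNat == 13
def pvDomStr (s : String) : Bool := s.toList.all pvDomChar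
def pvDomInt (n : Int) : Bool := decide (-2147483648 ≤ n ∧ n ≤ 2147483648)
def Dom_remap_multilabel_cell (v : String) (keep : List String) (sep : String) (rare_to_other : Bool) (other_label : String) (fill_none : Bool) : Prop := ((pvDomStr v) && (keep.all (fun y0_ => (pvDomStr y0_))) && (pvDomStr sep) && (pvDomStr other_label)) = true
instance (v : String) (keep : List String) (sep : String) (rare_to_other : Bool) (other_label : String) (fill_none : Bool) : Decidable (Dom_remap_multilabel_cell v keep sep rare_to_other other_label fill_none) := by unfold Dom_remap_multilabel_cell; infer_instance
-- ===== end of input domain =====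

-- B inverts the traversal: it filters sorted(set(keep)) against set(tokens) (output born sorted,
-- no final sort), detects a rare token by cardinality and merges other_label by sorted insertion.

-- ===== PORT A =====
-- shared helper: Python parse_labels (used verbatim by both A and B).
-- t.split(sep) raises ValueError when sep = "" (Pre_ excludes reaching it); total form uses getD [].
def pvParseLabels (v : String) (sep : String) : List String :=
  let t := PySem.Str.strip v
  if t = "" then []
  else if PySem.Str.lower t = "nan" ∨ PySem.Str.lower t = "null" then []
  else (((PySem.Str.split? t sep).getD []).filter (fun x => PySem.Str.strip x != "")).map
        (fun x => PySem.Str.strip x)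

def remap_multilabel_cell (v : String) (keep : List String) (sep : String) (rare_to_other : Bool) (other_label : String) (fill_none : Bool) : String :=
  let tokens := pvParseLabels v sep
  if tokens = [] then (if fill_none then "NONE" else "")
  else
    let st := tokens.foldl
      (fun (p : List String × Bool) t => if t ∈ keep then (p.1 ++ [t], p.2) else (p.1, true))
      ([], false)
    let out := if rare_to_other && st.2 then st.1 ++ [other_label] else st.1
    let out := PySem.List.sorted (PySem.Set.ofList out) (fun x => x) false
    if out = [] ∧ fill_none then "NONE" else PySem.Str.join sep out

-- ===== PORT B =====
-- B's while-loop insertion into a sorted list (advance while result[i] < x, then insert)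
def pvInsortB (x : String) : List String → List String
  | [] => [x]
  | h :: t => if h < x then h :: pvInsortB x t else x :: h :: t

def remap_multilabel_cell_alt (v : String) (keep : List String) (sep : String) (rare_to_other : Bool) (other_label : String) (fill_none : Bool) : String :=
  let tokens := pvParseLabels v sep
  if tokens = [] then (if fill_none then "NONE" else "")
  else
    let tokenSet := PySem.Set.ofList tokens
    let result := (PySem.List.sorted (PySem.Set.ofList keep) (fun x => x) false).filter
        (fun k => decide (k ∈ tokenSet))
    let result :=
      if rare_to_other && decide (result.length < tokenSet.length)
          && !(decide (other_label ∈ result)) then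
        pvInsortB other_label result
      else result
    if result = [] ∧ fill_none then "NONE" else PySem.Str.join sep result

-- ===== PRECONDITION & SPEC =====
-- Pre_ excludes exactly the inputs where Python raises ValueError: sep = "" while the stripped
-- cell is non-empty and not "nan"/"null" (t.split("") raises; both A and B raise there).
def Pre_remap_multilabel_cell (v : String) (keep : List String) (sep : String) (rare_to_other : Bool) (other_label : String) (fill_none : Bool) : Prop :=
  sep ≠ "" ∨ PySem.Str.strip v = "" ∨ PySem.Str.lower (PySem.Str.strip v) = "nan"
    ∨ PySem.Str.lower (PySem.Str.strip v) = "null"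
instance (v : String) (keep : List String) (sep : String) (rare_to_other : Bool) (other_label : String) (fill_none : Bool) : Decidable (Pre_remap_multilabel_cell v keep sep rare_to_other other_label fill_none) := by unfold Pre_remap_multilabel_cell; infer_instance

def pvWitness_remap_multilabel_cell : String × List String × String × Bool × String × Bool :=
  ("A;B;C", ["A", "B"], ";", true, "OTHER", false)

def Spec_remap_multilabel_cell (v : String) (keep : List String) (sep : String) (rare_to_other : Bool) (other_label : String) (fill_none : Bool) (out : String) : Prop := out = remap_multilabel_cell_alt v keep sep rare_to_other other_label fill_none
instance (v : String) (keep : List String) (sep : String) (rare_to_other : Bool) (other_label : String) (fill_none : Bool) (out : String) : Decidable (Spec_remap_multilabel_cell v keep sep rare_to_other other_label fill_none out) := by unfold Spec_remap_multilabel_cell; infer_instance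

-- ===== CLAIM =====
def Claim_equal_remap_multilabel_cell : Prop := ∀ (v : String) (keep : List String) (sep : String) (rare_to_other : Bool) (other_label : String) (fill_none : Bool), Dom_remap_multilabel_cell v keep sep rare_to_other other_label fill_none → Pre_remap_multilabel_cell v keep sep rare_to_other other_label fill_none → Spec_remap_multilabel_cell v keep sep rare_to_other other_label fill_none (remap_multilabel_cell v keep sep rare_to_other other_label fill_none)

-- ===== LEMMAS AND PROOFS =====

-- A's accumulating loop, characterised: kept tokens in order, and whether a rare token was seen.
theorem pvLoopA (keep : List String) (ts : List String) (acc : List String) (b : Bool) :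
    ts.foldl (fun (p : List String × Bool) t => if t ∈ keep then (p.1 ++ [t], p.2) else (p.1, true)) (acc, b)
      = (acc ++ ts.filter (fun t => decide (t ∈ keep)), b || ts.any (fun t => !decide (t ∈ keep))) := by
  induction ts generalizing acc b with
  | nil => simp
  | cons t ts ih =>
    by_cases h : t ∈ keep
    · simp [h, ih]
    · simp [h, ih]

theorem pvInsortB_perm (x : String) (l : List String) : (pvInsortB x l).Perm (x :: l) := by
  induction l with
  | nil => simp [pvInsortB]
  | cons h t ih =>
    simp only [pvInsortB]
    split
    · exact ((ih.cons h).trans (List.Perm.swap x h t))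
    · exact List.Perm.refl _

theorem pvInsortB_pairwise (x : String) (l : List String) (hl : l.Pairwise (· < ·)) (hx : x ∉ l) :
    (pvInsortB x l).Pairwise (· < ·) := by
  induction l with
  | nil => simp [pvInsortB]
  | cons h t ih =>
    rw [List.pairwise_cons] at hl
    simp only [List.mem_cons, not_or] at hx
    simp only [pvInsortB]
    split
    · rename_i hlt
      rw [List.pairwise_cons]
      refine ⟨?_, ih hl.2 hx.2⟩
      intro b hb
      rcases List.mem_cons.mp ((pvInsortB_perm x t).mem_iff.mp hb) with hbx | hbt
      · subst hbx; exact hlt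
      · exact hl.1 b hbt
    · rename_i hnlt
      have hxh : x < h := lt_of_le_of_ne (le_of_not_gt hnlt) hx.1
      rw [List.pairwise_cons]
      exact ⟨fun b hb => by
        rcases List.mem_cons.mp hb with hbh | hbt
        · subst hbh; exact hxh
        · exact hxh.trans (hl.1 b hbt), List.pairwise_cons.mpr hl⟩

-- cardinality test: B's rare condition equals A's "some token not in keep"
theorem pvRareCond (tokens keep : List String) :
    (tokens.any (fun t => !decide (t ∈ keep)))
      = decide (((PySem.List.sorted (PySem.Set.ofList keep) (fun x => x) false).filter
            (fun k => decide (k ∈ PySem.Set.ofList tokens))).length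
          < (PySem.Set.ofList tokens).length) := by
  set S := PySem.Set.ofList tokens with hS
  set R := (PySem.List.sorted (PySem.Set.ofList keep) (fun x => x) false).filter
      (fun k => decide (k ∈ S)) with hR
  have hSnd : S.Nodup := PySem.Set.nodup_ofList _
  have hRnd : R.Nodup :=
    ((PySem.List.sorted_perm _ _ _).nodup_iff.mpr (PySem.Set.nodup_ofList keep)).filter _
  have hmemR : ∀ x, x ∈ R ↔ x ∈ keep ∧ x ∈ S := by
    intro x
    simp [hR, List.mem_filter, PySem.List.mem_sorted, PySem.Set.mem_ofList]
  have hsub : R ⊆ S := fun x hx => (hmemR x).mp hx |>.2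
  rw [Bool.eq_iff_iff]
  simp only [List.any_eq_true, Bool.not_eq_true', decide_eq_false_iff_not, decide_eq_true_iff]
  constructor
  · rintro ⟨t, ht, htk⟩
    have htS : t ∈ S := by rw [hS, PySem.Set.mem_ofList]; exact ht
    have htR : t ∉ R := fun h => htk ((hmemR t).mp h).1
    have h1 : R.toFinset ⊂ S.toFinset := by
      constructor
      · intro x hx
        rw [List.mem_toFinset] at *
        exact hsub hx
      · intro h
        exact htR (List.mem_toFinset.mp (h (List.mem_toFinset.mpr htS)))
    calc R.length = R.toFinset.card := (List.toFinset_card_of_nodup hRnd).symm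
      _ < S.toFinset.card := Finset.card_lt_card h1
      _ = S.length := List.toFinset_card_of_nodup hSnd
  · intro hlt
    by_contra hall
    simp only [not_exists, not_and, not_not] at hall
    have hsub2 : S ⊆ R := by
      intro x hx
      rw [hmemR]
      refine ⟨hall x ?_, hx⟩
      rw [hS, PySem.Set.mem_ofList] at hx
      exact hx
    have : S.length ≤ R.length := by
      calc S.length = S.toFinset.card := (List.toFinset_card_of_nodup hSnd).symm
        _ ≤ R.toFinset.card := Finset.card_le_card (fun x hx =>
              List.mem_toFinset.mpr (hsub2 (List.mem_toFinset.mp hx)))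
        _ = R.length := List.toFinset_card_of_nodup hRnd
    omega

-- the core equality: A's sorted(set(out)) equals B's filtered-keep list with the insort
theorem pvKeyEq (tokens keep : List String) (rto : Bool) (other : String) :
    PySem.List.sorted
      (PySem.Set.ofList
        (if rto && tokens.any (fun t => !decide (t ∈ keep))
          then tokens.filter (fun t => decide (t ∈ keep)) ++ [other]
          else tokens.filter (fun t => decide (t ∈ keep))))
      (fun x => x) false
    = (if rto && decide (((PySem.List.sorted (PySem.Set.ofList keep) (fun x => x) false).filter
              (fun k => decide (k ∈ PySem.Set.ofList tokens))).length
            < (PySem.Set.ofList tokens).length)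
          && !(decide (other ∈ (PySem.List.sorted (PySem.Set.ofList keep) (fun x => x) false).filter
              (fun k => decide (k ∈ PySem.Set.ofList tokens))))
        then pvInsortB other ((PySem.List.sorted (PySem.Set.ofList keep) (fun x => x) false).filter
              (fun k => decide (k ∈ PySem.Set.ofList tokens)))
        else (PySem.List.sorted (PySem.Set.ofList keep) (fun x => x) false).filter
              (fun k => decide (k ∈ PySem.Set.ofList tokens))) := by
  set S := PySem.Set.ofList tokens with hS
  set R0 := (PySem.List.sorted (PySem.Set.ofList keep) (fun x => x) false).filter
      (fun k => decide (k ∈ S)) with hR0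
  have hR0nd : R0.Nodup :=
    ((PySem.List.sorted_perm _ _ _).nodup_iff.mpr (PySem.Set.nodup_ofList keep)).filter _
  have hR0pw : R0.Pairwise (· < ·) :=
    (PySem.List.sorted_ofList_pairwise_lt (xs := keep)).filter _
  have hmemR0 : ∀ x, x ∈ R0 ↔ x ∈ keep ∧ x ∈ tokens := by
    intro x
    simp [hR0, List.mem_filter, PySem.List.mem_sorted, PySem.Set.mem_ofList, hS]
  set kept := tokens.filter (fun t => decide (t ∈ keep)) with hkept
  have hmemkept : ∀ x, x ∈ kept ↔ x ∈ keep ∧ x ∈ tokens := by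
    intro x; rw [hkept, List.mem_filter]; simp [and_comm]
  have hcond := pvRareCond tokens keep
  rw [← hS, ← hR0] at hcond
  rw [← hcond]
  set RF := if rto && tokens.any (fun t => !decide (t ∈ keep)) && !(decide (other ∈ R0))
      then pvInsortB other R0 else R0 with hRF
  have hRFnd : RF.Nodup := by
    rw [hRF]; split
    · rename_i hc
      have hno : other ∉ R0 := by
        simp only [Bool.and_eq_true, Bool.not_eq_true', decide_eq_false_iff_not] at hc
        exact hc.2
      exact (pvInsortB_perm other R0).nodup_iff.mpr (List.nodup_cons.mpr ⟨hno, hR0nd⟩)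
    · exact hR0nd
  have hRFpw : RF.Pairwise (· < ·) := by
    rw [hRF]; split
    · rename_i hc
      simp only [Bool.and_eq_true, Bool.not_eq_true', decide_eq_false_iff_not] at hc
      exact pvInsortB_pairwise _ _ hR0pw hc.2
    · exact hR0pw
  have hmemRF : ∀ x, x ∈ RF ↔ x ∈ PySem.Set.ofList
      (if rto && tokens.any (fun t => !decide (t ∈ keep)) then kept ++ [other] else kept) := by
    intro x
    rw [PySem.Set.mem_ofList, hRF]
    by_cases hr : (rto && tokens.any (fun t => !decide (t ∈ keep))) = true
    · rw [if_pos hr]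
      by_cases ho : other ∈ R0
      · rw [if_neg (by rw [hr, decide_eq_true ho]; simp), List.mem_append, List.mem_singleton,
          hmemR0 x, hmemkept x]
        constructor
        · intro h; exact Or.inl h
        · rintro (h | rfl)
          · exact h
          · exact (hmemR0 _).mp ho
      · rw [if_pos (by rw [hr, decide_eq_false ho]; rfl),
          (pvInsortB_perm other R0).mem_iff,
          List.mem_cons, List.mem_append, List.mem_singleton, hmemR0 x, hmemkept x]
        tauto
    · rw [if_neg hr, if_neg (fun h => hr ((Bool.and_eq_true _ _).mp h).1),
        hmemR0 x, hmemkept x]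
  have hperm : RF.Perm (PySem.Set.ofList
      (if rto && tokens.any (fun t => !decide (t ∈ keep)) then kept ++ [other] else kept)) :=
    (List.perm_ext_iff_of_nodup hRFnd (PySem.Set.nodup_ofList _)).mpr hmemRF
  exact PySem.List.sorted_eq_of_perm_of_pairwise_lt _ _ _ hperm hRFpw

theorem remap_equal (v : String) (keep : List String) (sep : String) (rare_to_other : Bool) (other_label : String) (fill_none : Bool) :
    remap_multilabel_cell v keep sep rare_to_other other_label fill_none
      = remap_multilabel_cell_alt v keep sep rare_to_other other_label fill_none := by
  unfold remap_multilabel_cell remap_multilabel_cell_alt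
  by_cases hnil : pvParseLabels v sep = []
  · simp only [hnil, if_pos]
  · simp only [hnil, if_false]
    rw [pvLoopA]
    simp only [List.nil_append, Bool.false_or]
    rw [pvKeyEq (pvParseLabels v sep) keep rare_to_other other_label]
-- ===== VERDICT =====
theorem remap_multilabel_cell_spec : Claim_equal_remap_multilabel_cell := by
  intro v keep sep r o f _ _
  exact remap_equal v keep sep r o f
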